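-- pv_equiv track=rewrite | github.com/Toppyo/SecurityClass | RSA_foundamental.py | findParam
-- ===== SOURCE A (Python) =====
-- def findParam(a, b, list, n):
--     if n==len(list)+1:
--         return 1, 0
--     elif n==len(list)+2:
--         return 0, 1
--     else:
--         previous_T, previous_S = findParam(a, b, list, n+1)
--         previous_previous_T, previous_previous_S = findParam(a, b, list, n+2)
--         return previous_previous_T-previous_T*list[-n], previous_previous_S-previous_S*list[-n]
-- ===== SOURCE B (Python) =====
-- def findParam(a, b, list, n):
--     L = len(list)
--     if n == L + 2:
--         return 0, 1
--     # bottom-up: keep the pair for k+1 in (t1, s1) and for k+2 in (t2, s2)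
--     t1, s1 = 1, 0   # value at L + 1
--     t2, s2 = 0, 1   # value at L + 2
--     for k in range(L, n - 1, -1):
--         t1, t2 = t2 - t1 * list[-k], t1
--         s1, s2 = s2 - s1 * list[-k], s1
--     return t1, s1
-- ===== Notes on version B (the rewrite author's own statement) =====
-- stated objective: faster
-- what changed: Replaces the naive double recursion (recomputing findParam(n+1) and findParam(n+2) separately) with a single bottom-up loop from len(list) down to n that keeps only the last two (T,S) pairs; intended as faster (A is exponential): measured 7.56x at n=64, A times out on larger inputs.
import Mathlib
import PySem

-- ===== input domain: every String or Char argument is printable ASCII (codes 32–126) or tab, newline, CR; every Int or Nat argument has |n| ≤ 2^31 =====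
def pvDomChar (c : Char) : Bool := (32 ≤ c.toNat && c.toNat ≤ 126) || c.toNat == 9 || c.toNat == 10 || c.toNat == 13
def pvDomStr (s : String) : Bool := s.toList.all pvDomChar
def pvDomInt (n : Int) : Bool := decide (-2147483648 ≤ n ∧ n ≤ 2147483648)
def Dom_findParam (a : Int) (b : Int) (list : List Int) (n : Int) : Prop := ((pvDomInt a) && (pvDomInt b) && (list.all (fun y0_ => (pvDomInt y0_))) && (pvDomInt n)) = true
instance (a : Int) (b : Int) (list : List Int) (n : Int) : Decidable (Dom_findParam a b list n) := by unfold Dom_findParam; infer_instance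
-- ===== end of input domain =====

-- B replaces A's double recursion by one bottom-up loop keeping the last two (T,S) pairs; intended as faster (measured 7.56x at n=64; A timed out on larger inputs).

-- ===== PORT A =====
-- A's recursion climbs from n to len(list)+2; the fuel ((len+2-n).toNat) counts exactly those steps,
-- so inside Pre_ the fuel never runs out and the (0,0) fallback is unreachable.
def findParamGo (list : List Int) (f : Nat) (n : Int) : Int × Int :=
  if n = (list.length : Int) + 1 then (1, 0)
  else if n = (list.length : Int) + 2 then (0, 1)
  else match f with
    | 0 => (0, 0)
    | Nat.succ f' =>
      let p := findParamGo list f' (n + 1)      -- previous_T, previous_S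
      let pp := findParamGo list f' (n + 2)     -- previous_previous_T, previous_previous_S
      (pp.1 - p.1 * (PySem.List.pyGet? list (-n)).getD 0,
       pp.2 - p.2 * (PySem.List.pyGet? list (-n)).getD 0)

def findParam (a : Int) (b : Int) (list : List Int) (n : Int) : Int × Int :=
  findParamGo list ((list.length + 2 - n).toNat) n

-- ===== PORT B =====
-- one loop iteration of Source B: state = ((t1,s1),(t2,s2))
def findParamStep (list : List Int) (st : (Int × Int) × (Int × Int)) (k : Int) : (Int × Int) × (Int × Int) :=
  let g := (PySem.List.pyGet? list (-k)).getD 0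
  ((st.2.1 - st.1.1 * g, st.2.2 - st.1.2 * g), st.1)

def findParam_alt (a : Int) (b : Int) (list : List Int) (n : Int) : Int × Int :=
  let L : Int := list.length
  if n = L + 2 then (0, 1)
  else ((PySem.List.pyRange L (n - 1) (-1)).foldl (findParamStep list) ((1, 0), (0, 1))).1

-- ===== PRECONDITION & SPEC =====
-- Pre_ is exactly where Python A returns: for n > len(list)+2 the recursion never reaches a base
-- case (RecursionError), for n < 1-len(list) list[-n] raises IndexError.
def Pre_findParam (a : Int) (b : Int) (list : List Int) (n : Int) : Prop :=
  1 - (list.length : Int) ≤ n ∧ n ≤ (list.length : Int) + 2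
instance (a : Int) (b : Int) (list : List Int) (n : Int) : Decidable (Pre_findParam a b list n) := by unfold Pre_findParam; infer_instance
def pvWitness_findParam : Int × Int × List Int × Int := (0, 0, [2, 3], 1)

def Spec_findParam (a : Int) (b : Int) (list : List Int) (n : Int) (out : Int × Int) : Prop := out = findParam_alt a b list n
instance (a : Int) (b : Int) (list : List Int) (n : Int) (out : Int × Int) : Decidable (Spec_findParam a b list n out) := by unfold Spec_findParam; infer_instance

-- ===== CLAIM (what is proved, stated in full; the proofs are below) =====
def Claim_equal_findParam : Prop := ∀ (a : Int) (b : Int) (list : List Int) (n : Int), Dom_findParam a b list n → Pre_findParam a b list n → Spec_findParam a b list n (findParam a b list n)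

-- ===== LEMMAS AND PROOFS =====

-- the recursion's value with exactly enough fuel
def findParamAP (list : List Int) (n : Int) : Int × Int :=
  findParamGo list ((list.length + 2 - n).toNat) n

theorem findParamGo_fuel (list : List Int) :
    ∀ (f g : Nat) (n : Int), n ≤ (list.length : Int) + 2 →
      ((list.length : Int) + 2 - n).toNat ≤ f → ((list.length : Int) + 2 - n).toNat ≤ g →
      findParamGo list f n = findParamGo list g n := by
  intro f
  induction f with
  | zero =>
    intro g n hn hf _
    have hne : n = (list.length : Int) + 2 := by omega
    have h1 : ¬ (n = (list.length : Int) + 1) := by omega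
    subst hne
    rw [findParamGo.eq_def]; rw [findParamGo.eq_def]
    simp [h1]
  | succ f ih =>
    intro g n hn hf hg
    by_cases h1 : n = (list.length : Int) + 1
    · rw [findParamGo.eq_def]; rw [findParamGo.eq_def]; simp [h1]
    by_cases h2 : n = (list.length : Int) + 2
    · rw [findParamGo.eq_def]; rw [findParamGo.eq_def]; simp [h2]
    have hnL : n ≤ (list.length : Int) := by omega
    obtain ⟨g', rfl⟩ : ∃ g', g = g' + 1 := ⟨g - 1, by omega⟩
    rw [findParamGo.eq_def]; rw [findParamGo.eq_def]
    simp only [h1, h2, if_false]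
    have e1 : findParamGo list f (n + 1) = findParamGo list g' (n + 1) :=
      ih g' (n + 1) (by omega) (by omega) (by omega)
    have e2 : findParamGo list f (n + 2) = findParamGo list g' (n + 2) :=
      ih g' (n + 2) (by omega) (by omega) (by omega)
    rw [e1, e2]

theorem findParamAP_rec (list : List Int) (n : Int) (hn : n ≤ (list.length : Int)) :
    findParamAP list n =
      ((findParamAP list (n + 2)).1 - (findParamAP list (n + 1)).1 * (PySem.List.pyGet? list (-n)).getD 0,
       (findParamAP list (n + 2)).2 - (findParamAP list (n + 1)).2 * (PySem.List.pyGet? list (-n)).getD 0) := by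
  unfold findParamAP
  obtain ⟨k, hk⟩ : ∃ k, ((list.length : Int) + 2 - n).toNat = k + 1 :=
    ⟨((list.length : Int) + 2 - n).toNat - 1, by omega⟩
  rw [hk]; rw [findParamGo.eq_def]
  simp only [show ¬ (n = (list.length : Int) + 1) from by omega,
             show ¬ (n = (list.length : Int) + 2) from by omega, if_false]
  rw [findParamGo_fuel list k (((list.length : Int) + 2 - (n + 1)).toNat) (n + 1) (by omega) (by omega) (by omega),
      findParamGo_fuel list k (((list.length : Int) + 2 - (n + 2)).toNat) (n + 2) (by omega) (by omega) (by omega)]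

theorem findParamAP_base1 (list : List Int) :
    findParamAP list ((list.length : Int) + 1) = (1, 0) := by
  unfold findParamAP; rw [findParamGo.eq_def]; simp

theorem findParamAP_base2 (list : List Int) :
    findParamAP list ((list.length : Int) + 2) = (0, 1) := by
  unfold findParamAP; rw [findParamGo.eq_def]
  simp [show ¬ ((list.length : Int) + 2 = (list.length : Int) + 1) from by omega]

theorem findParam_fold_inv (list : List Int) (n : Int) :
    ∀ (d : Nat) (m : Int), m = (n - 1) + d → m ≤ (list.length : Int) →
      (PySem.List.pyRange m (n - 1) (-1)).foldl (findParamStep list)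
        (findParamAP list (m + 1), findParamAP list (m + 2)) =
      (findParamAP list n, findParamAP list (n + 1)) := by
  intro d
  induction d with
  | zero =>
    intro m hm _
    have hmn : m = n - 1 := by omega
    subst hmn
    rw [PySem.List.pyRange_neg_one_eq_nil (le_refl _)]
    rw [show n - 1 + 1 = n from by omega, show n - 1 + 2 = n + 1 from by omega]
    rfl
  | succ d ih =>
    intro m hm hL
    have hlt : n - 1 < m := by omega
    rw [PySem.List.pyRange_neg_one_cons hlt, List.foldl_cons]
    have hstep : findParamStep list (findParamAP list (m + 1), findParamAP list (m + 2)) m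
        = (findParamAP list m, findParamAP list (m + 1)) := by
      rw [findParamAP_rec list m (by omega)]
      rfl
    rw [hstep]
    have h := ih (m - 1) (by omega) (by omega)
    rw [show m - 1 + 1 = m from by omega, show m - 1 + 2 = m + 1 from by omega] at h
    exact h

-- ===== VERDICT (by name: the statement is the Claim_ definition above) =====
theorem findParam_spec : Claim_equal_findParam := by
  intro a b list n _ hPre
  obtain ⟨hlo, hhi⟩ := hPre
  unfold Spec_findParam findParam findParam_alt
  by_cases h2 : n = (list.length : Int) + 2
  · subst h2
    rw [if_pos rfl]
    rw [show (((list.length : Int) + 2 - ((list.length : Int) + 2)).toNat) = 0 from by omega]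
    rw [findParamGo.eq_def]
    simp [show ¬ ((list.length : Int) + 2 = (list.length : Int) + 1) from by omega]
  · simp only [h2, if_false]
    have h := findParam_fold_inv list n ((list.length : Int) - (n - 1)).toNat (list.length : Int)
      (by omega) (by omega)
    rw [findParamAP_base1, findParamAP_base2] at h
    rw [h]
    rfl
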